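-- pv_equiv track=rewrite | github.com/smacker/two-light-theme | convert_two_theme.py | apply_patch_semantics
-- ===== SOURCE A (Python) =====
-- from typing import Any, Dict, Iterable, List, Optional, Tuple
--
-- def apply_patch_semantics(theme: Dict[str, Any]) -> int:
--     """
--     Apply the semantic edits represented by TwoDark.tmTheme.patch.
--     Returns number of edits applied.
--     """
--     edits = 0
--     settings = theme.get("settings")
--     if not isinstance(settings, list):
--         raise RuntimeError("Theme plist missing top-level `settings` array")
--
--     def maybe_update_scope(entry: Dict[str, Any], *, name: str, old_sub: str, new_scope: str) -> bool:
--         if entry.get("name") != name: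
--             return False
--         scope = entry.get("scope")
--         if not isinstance(scope, str):
--             return False
--         if old_sub not in scope and scope != old_sub:
--             # We only patch when the expected scope shape is present.
--             return False
--         if scope == new_scope:
--             return False
--         entry["scope"] = new_scope
--         return True
--
--     # 1) Classes: add entity.name
--     for entry in settings:
--         if not isinstance(entry, dict):
--             continue
--         if maybe_update_scope(
--             entry,
--             name="Classes",
--             old_sub="support.class, entity.name.class, entity.name.type.class",
--             new_scope="support.class, entity.name.class, entity.name.type.class, entity.name",
--         ):
--             edits += 1
--             break
--
--     # 2) Headings: exclude markdown html scope
--     for entry in settings: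
--         if not isinstance(entry, dict):
--             continue
--         if maybe_update_scope(
--             entry,
--             name="Headings",
--             old_sub="markup.heading punctuation.definition.heading, entity.name.section",
--             new_scope="markup.heading punctuation.definition.heading, entity.name.section, markup.heading - text.html.markdown",
--         ):
--             edits += 1
--             break
--
--     # 3) Json key: update scope path
--     for entry in settings:
--         if not isinstance(entry, dict):
--             continue
--         if entry.get("name") != "Json key":
--             continue
--         scope = entry.get("scope")
--         if not isinstance(scope, str):
--             continue
--         if "meta.structure.dictionary.json" not in scope:
--             continue
--         new_scope = scope.replace("meta.structure.dictionary.json", "meta.mapping.key.json")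
--         if new_scope != scope:
--             entry["scope"] = new_scope
--             edits += 1
--             break
--
--     return edits
-- ===== SOURCE B (Python) =====
-- # Single pass over `settings` with a table of the three patch specs keyed by entry name;
-- # mutates matched entries' "scope" in place exactly like A (return-value = number of edits).
-- def apply_patch_semantics(theme):
--     settings = theme.get("settings")
--     if not isinstance(settings, list):
--         raise RuntimeError("Theme plist missing top-level `settings` array")
--
--     def sub_patch(old_sub, new_scope):
--         def transform(scope):
--             if (old_sub in scope or scope == old_sub) and scope != new_scope:
--                 return new_scope
--             return None
--         return transform
--
--     def json_patch(scope):
--         new_scope = scope.replace("meta.structure.dictionary.json", "meta.mapping.key.json")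
--         if "meta.structure.dictionary.json" in scope and new_scope != scope:
--             return new_scope
--         return None
--
--     pending = {
--         "Classes": sub_patch(
--             "support.class, entity.name.class, entity.name.type.class",
--             "support.class, entity.name.class, entity.name.type.class, entity.name",
--         ),
--         "Headings": sub_patch(
--             "markup.heading punctuation.definition.heading, entity.name.section",
--             "markup.heading punctuation.definition.heading, entity.name.section, markup.heading - text.html.markdown",
--         ),
--         "Json key": json_patch,
--     }
--
--     edits = 0
--     for entry in settings:
--         if not isinstance(entry, dict):
--             continue
--         transform = pending.get(entry.get("name"))
--         if transform is None:
--             continue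
--         scope = entry.get("scope")
--         if not isinstance(scope, str):
--             continue
--         new_scope = transform(scope)
--         if new_scope is not None:
--             entry["scope"] = new_scope
--             edits += 1
--             del pending[entry.get("name")]
--     return edits
-- ===== Notes on version B (the rewrite author's own statement) =====
-- stated objective: simpler
-- what changed: Replaces A's three separate scans over settings (one per patch, each with its own break) by a single pass driven by a table of patch transforms keyed by entry name, with a pending-set ensuring each patch fires at most once.
-- outside the precondition, e.g. on apply_patch_semantics({'nosettings': []}): A raises RuntimeError, B raises RuntimeError
import Mathlib
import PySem

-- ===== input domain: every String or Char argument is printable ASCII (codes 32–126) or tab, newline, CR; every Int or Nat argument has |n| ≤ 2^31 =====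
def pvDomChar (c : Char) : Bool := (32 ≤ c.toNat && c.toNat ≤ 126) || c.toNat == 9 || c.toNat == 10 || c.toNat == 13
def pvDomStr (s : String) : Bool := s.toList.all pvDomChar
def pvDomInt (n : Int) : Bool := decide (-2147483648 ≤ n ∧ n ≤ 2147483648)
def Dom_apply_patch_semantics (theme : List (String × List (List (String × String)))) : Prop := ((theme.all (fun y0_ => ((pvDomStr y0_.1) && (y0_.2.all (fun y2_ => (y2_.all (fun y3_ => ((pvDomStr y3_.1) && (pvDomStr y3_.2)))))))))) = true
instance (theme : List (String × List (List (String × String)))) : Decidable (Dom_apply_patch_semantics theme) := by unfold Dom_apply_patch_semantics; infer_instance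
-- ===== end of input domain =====

-- B is a single table-driven pass instead of A's three scans; both Pythons mutate matched
-- entries' "scope" in place identically — the equivalence proved here is about the RETURN value.
-- In the Lean types every entry IS a dict and every scope a string, so the Python
-- `isinstance` guards on entries/scopes are identically true and are not re-tested.

-- shared string constants of the three patches (literals in both Pythons)
def pvOldC : String := "support.class, entity.name.class, entity.name.type.class"
def pvNewC : String := "support.class, entity.name.class, entity.name.type.class, entity.name"
def pvOldH : String := "markup.heading punctuation.definition.heading, entity.name.section"
def pvNewH : String := "markup.heading punctuation.definition.heading, entity.name.section, markup.heading - text.html.markdown"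
def pvJOld : String := "meta.structure.dictionary.json"
def pvJNew : String := "meta.mapping.key.json"

-- entry.get(k) / entry[k] = v on a Python dict (assoc list per the type convention)
def pvGet (e : List (String × String)) (k : String) : Option String := (PySem.Dict.mk e).get? k
def pvSet (e : List (String × String)) (k v : String) : List (String × String) := ((PySem.Dict.mk e).insert k v).items

-- ===== PORT A =====
-- maybe_update_scope: returns (possibly mutated entry, whether it patched)
def maybe_update_scope (entry : List (String × String)) (name old_sub new_scope : String) : List (String × String) × Bool :=
  if pvGet entry "name" ≠ some name then (entry, false)
  else match pvGet entry "scope" with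
    | none => (entry, false)
    | some scope =>
      if PySem.Str.isIn old_sub scope = false ∧ scope ≠ old_sub then (entry, false)
      else if scope = new_scope then (entry, false)
      else (pvSet entry "scope" new_scope, true)

-- one `for … break` pass of patches 1/2: threads the mutated settings list, returns edits added
def passSub (settings : List (List (String × String))) (name old_sub new_scope : String) : List (List (String × String)) × Int :=
  match settings with
  | [] => ([], 0)
  | e :: rest =>
    match maybe_update_scope e name old_sub new_scope with
    | (e', true) => (e' :: rest, 1)
    | (_, false) =>
      let r := passSub rest name old_sub new_scope
      (e :: r.1, r.2)

-- the third `for … break` pass (Json key, via replace)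
def passJson (settings : List (List (String × String))) : List (List (String × String)) × Int :=
  match settings with
  | [] => ([], 0)
  | e :: rest =>
    let skip := let r := passJson rest; (e :: r.1, r.2)
    if pvGet e "name" ≠ some "Json key" then skip
    else match pvGet e "scope" with
      | none => skip
      | some scope =>
        if PySem.Str.isIn pvJOld scope = false then skip
        else
          let new_scope := PySem.Str.replace scope pvJOld pvJNew
          if new_scope ≠ scope then (pvSet e "scope" new_scope :: rest, 1)
          else skip

def apply_patch_semantics (theme : List (String × List (List (String × String)))) : Int :=
  match (PySem.Dict.mk theme).get? "settings" with
  | none => 0   -- Python raises RuntimeError here; excluded by Pre_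
  | some settings =>
    let p1 := passSub settings "Classes" pvOldC pvNewC
    let p2 := passSub p1.1 "Headings" pvOldH pvNewH
    let p3 := passJson p2.1
    p1.2 + p2.2 + p3.2

-- ===== PORT B =====
-- the two transform shapes of Source B's pending table
def tSub (old_sub new_scope scope : String) : Option String :=
  if (PySem.Str.isIn old_sub scope || scope == old_sub) && scope != new_scope then some new_scope else none

def tJson (scope : String) : Option String :=
  let new_scope := PySem.Str.replace scope pvJOld pvJNew
  if PySem.Str.isIn pvJOld scope && new_scope != scope then some new_scope else none

-- one entry of the single pass; state = (edits, pending flag of each of the three patches)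
-- (Source B's dict of transform closures keyed by name is ported as this name dispatch)
def altStep (st : Int × Bool × Bool × Bool) (entry : List (String × String)) : Int × Bool × Bool × Bool :=
  let (edits, pc, ph, pj) := st
  match pvGet entry "name" with
  | none => st
  | some n =>
    if n = "Classes" then
      if pc then
        match pvGet entry "scope" with
        | none => st
        | some scope => match tSub pvOldC pvNewC scope with
          | some _ => (edits + 1, false, ph, pj)
          | none => st
      else st
    else if n = "Headings" then
      if ph then
        match pvGet entry "scope" with
        | none => st
        | some scope => match tSub pvOldH pvNewH scope with
          | some _ => (edits + 1, pc, false, pj)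
          | none => st
      else st
    else if n = "Json key" then
      if pj then
        match pvGet entry "scope" with
        | none => st
        | some scope => match tJson scope with
          | some _ => (edits + 1, pc, ph, false)
          | none => st
      else st
    else st

def apply_patch_semantics_alt (theme : List (String × List (List (String × String)))) : Int :=
  match (PySem.Dict.mk theme).get? "settings" with
  | none => 0   -- Source B raises RuntimeError here; excluded by Pre_
  | some settings => (settings.foldl altStep (0, true, true, true)).1

-- ===== PRECONDITION & SPEC =====
-- Pre_ excludes exactly the themes without a "settings" key, on which both Pythons raise RuntimeError.
def Pre_apply_patch_semantics (theme : List (String × List (List (String × String)))) : Prop :=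
  ∃ p ∈ theme, p.1 = "settings"
instance (theme : List (String × List (List (String × String)))) : Decidable (Pre_apply_patch_semantics theme) := by unfold Pre_apply_patch_semantics; infer_instance

def pvWitness_apply_patch_semantics : (List (String × List (List (String × String)))) := [("settings", [])]

def Spec_apply_patch_semantics (theme : List (String × List (List (String × String)))) (out : Int) : Prop := out = apply_patch_semantics_alt theme
instance (theme : List (String × List (List (String × String)))) (out : Int) : Decidable (Spec_apply_patch_semantics theme out) := by unfold Spec_apply_patch_semantics; infer_instance

-- ===== CLAIM (what is proved, stated in full; the proofs are below) =====
def Claim_equal_apply_patch_semantics : Prop := ∀ (theme : List (String × List (List (String × String)))), Dom_apply_patch_semantics theme → Pre_apply_patch_semantics theme → Spec_apply_patch_semantics theme (apply_patch_semantics theme)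

-- ===== LEMMAS AND PROOFS =====

-- the semantic "this entry matches patch …" predicates
def mSub (name old_sub new_scope : String) (e : List (String × String)) : Bool :=
  (pvGet e "name" == some name) &&
  (match pvGet e "scope" with
   | some s => (PySem.Str.isIn old_sub s || s == old_sub) && s != new_scope
   | none => false)

def mJson (e : List (String × String)) : Bool :=
  (pvGet e "name" == some "Json key") &&
  (match pvGet e "scope" with
   | some s => PySem.Str.isIn pvJOld s && (PySem.Str.replace s pvJOld pvJNew != s)
   | none => false)

lemma pvGet_pvSet_ne (e : List (String × String)) (k v k' : String) (h : k' ≠ k) :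
    pvGet (pvSet e k v) k' = pvGet e k' := by
  simpa [pvGet, pvSet] using PySem.Dict.get?_insert_of_ne (PySem.Dict.mk e) v h

lemma mu_false (e : List (String × String)) (name old_sub new_scope : String)
    (h : mSub name old_sub new_scope e = false) :
    maybe_update_scope e name old_sub new_scope = (e, false) := by
  unfold maybe_update_scope
  unfold mSub at h
  cases hn : pvGet e "name" with
  | none => simp
  | some n =>
    rw [hn] at h
    by_cases hne : n = name
    · subst hne
      rw [if_neg (by simp)]
      cases hs : pvGet e "scope" with
      | none => rfl
      | some s =>
        rw [hs] at h
        simp only [beq_self_eq_true, Bool.true_and] at h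
        change (if PySem.Str.isIn old_sub s = false ∧ s ≠ old_sub then (e, false)
          else if s = new_scope then (e, false)
          else (pvSet e "scope" new_scope, true)) = (e, false)
        split_ifs with h1 h2 <;> try rfl
        exfalso
        have hor : (PySem.Str.isIn old_sub s || s == old_sub) = true := by
          by_cases hi : PySem.Str.isIn old_sub s = true
          · rw [hi, Bool.true_or]
          · have hs2 : s = old_sub := by
              by_contra hso
              exact h1 ⟨by simpa using hi, hso⟩
            simp [hs2]
        rw [hor] at h
        simp at h
        exact h2 h
    · rw [if_pos (by simp [hne])]

lemma mu_true (e : List (String × String)) (name old_sub new_scope : String)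
    (h : mSub name old_sub new_scope e = true) :
    maybe_update_scope e name old_sub new_scope = (pvSet e "scope" new_scope, true) ∧
    pvGet e "name" = some name := by
  unfold mSub at h
  cases hn : pvGet e "name" with
  | none => rw [hn] at h; simp at h
  | some n =>
    rw [hn] at h
    simp only [Bool.and_eq_true, beq_iff_eq, Option.some.injEq] at h
    obtain ⟨hne, h⟩ := h
    subst hne
    refine ⟨?_, rfl⟩
    unfold maybe_update_scope
    rw [hn]
    rw [if_neg (by simp)]
    cases hs : pvGet e "scope" with
    | none => rw [hs] at h; simp at h
    | some s =>
      rw [hs] at h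
      simp only [Bool.and_eq_true, Bool.or_eq_true, beq_iff_eq, bne_iff_ne, ne_eq] at h
      have hcond : ¬(PySem.Str.isIn old_sub s = false ∧ s ≠ old_sub) := by
        rcases h.1 with hi | hi
        · intro hc; rw [hc.1] at hi; cases hi
        · intro hc; exact hc.2 hi
      change (if PySem.Str.isIn old_sub s = false ∧ s ≠ old_sub then (e, false)
        else if s = new_scope then (e, false)
        else (pvSet e "scope" new_scope, true)) = (pvSet e "scope" new_scope, true)
      rw [if_neg hcond, if_neg h.2]

lemma passSub_snd (s : List (List (String × String))) (name old_sub new_scope : String) :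
    (passSub s name old_sub new_scope).2 =
      (if s.any (mSub name old_sub new_scope) then 1 else 0) := by
  induction s with
  | nil => simp [passSub]
  | cons e rest ih =>
    cases hm : mSub name old_sub new_scope e with
    | true =>
      rw [passSub, (mu_true e name old_sub new_scope hm).1]
      simp [hm]
    | false =>
      rw [passSub, mu_false e name old_sub new_scope hm]
      simp [hm, ih]

lemma passSub_any (s : List (List (String × String))) (name old_sub new_scope : String)
    (p : List (String × String) → Bool)
    (hp : ∀ e, pvGet e "name" = some name → p e = false) :
    (passSub s name old_sub new_scope).1.any p = s.any p := by
  induction s with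
  | nil => simp [passSub]
  | cons e rest ih =>
    cases hm : mSub name old_sub new_scope e with
    | true =>
      obtain ⟨heq, hname⟩ := mu_true e name old_sub new_scope hm
      rw [passSub, heq]
      have h1 : p (pvSet e "scope" new_scope) = false := by
        apply hp
        rw [pvGet_pvSet_ne e _ _ _ (by decide)]
        exact hname
      simp [h1, hp e hname]
    | false =>
      rw [passSub, mu_false e name old_sub new_scope hm]
      simp [ih]

lemma passJson_snd (s : List (List (String × String))) :
    (passJson s).2 = (if s.any mJson then 1 else 0) := by
  induction s with
  | nil => simp [passJson]
  | cons e rest ih =>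
    rw [passJson]
    cases hn : pvGet e "name" with
    | none =>
      rw [if_pos (by simp)]
      simp [mJson, hn, ih]
    | some n =>
      by_cases hne : n = "Json key"
      · subst hne
        rw [if_neg (by simp)]
        cases hs : pvGet e "scope" with
        | none => simp [hs, mJson, hn, ih]
        | some sc =>
          by_cases hin : PySem.Str.isIn pvJOld sc = true
          · by_cases hrep : PySem.Str.replace sc pvJOld pvJNew = sc
            · simp [hrep, ih, mJson, hn, hs, PySem.Str.isIn_eq] at *
            · simp only [PySem.Str.isIn_eq] at hin
              simp [hin, hrep, mJson, hn, hs]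
          · have hin' : PySem.Str.isIn pvJOld sc = false := by
              simpa using hin
            simp only [PySem.Str.isIn_eq] at hin'
            simp [hin', ih, mJson, hn, hs]
      · rw [if_pos (by simp [hne])]
        simp [mJson, hn, hne, ih]

lemma alt_fold (s : List (List (String × String))) (edits : Int) (pc ph pj : Bool) :
    (s.foldl altStep (edits, pc, ph, pj)).1 =
      edits + (if pc && s.any (mSub "Classes" pvOldC pvNewC) then 1 else 0)
            + (if ph && s.any (mSub "Headings" pvOldH pvNewH) then 1 else 0)
            + (if pj && s.any mJson then 1 else 0) := by
  induction s generalizing edits pc ph pj with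
  | nil => simp
  | cons e rest ih =>
    rw [List.foldl_cons]
    cases hn : pvGet e "name" with
    | none =>
      have hstep : altStep (edits, pc, ph, pj) e = (edits, pc, ph, pj) := by
        simp [altStep, hn]
      rw [hstep, ih]
      simp [mSub, mJson, hn]
    | some n =>
      by_cases hc : n = "Classes"
      · subst hc
        have hm2 : mSub "Headings" pvOldH pvNewH e = false := by simp [mSub, hn]
        have hm3 : mJson e = false := by simp [mJson, hn]
        cases pc with
        | false =>
          have hstep : altStep (edits, false, ph, pj) e = (edits, false, ph, pj) := by
            simp [altStep, hn]
          rw [hstep, ih]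
          simp [hm2, hm3]
        | true =>
          cases hs : pvGet e "scope" with
          | none =>
            have hstep : altStep (edits, true, ph, pj) e = (edits, true, ph, pj) := by
              simp [altStep, hn, hs]
            have hm1 : mSub "Classes" pvOldC pvNewC e = false := by simp [mSub, hn, hs]
            rw [hstep, ih]
            simp [hm1, hm2, hm3]
          | some sc =>
            cases ht : tSub pvOldC pvNewC sc with
            | none =>
              have hstep : altStep (edits, true, ph, pj) e = (edits, true, ph, pj) := by
                simp [altStep, hn, hs, ht]
              have hm1 : mSub "Classes" pvOldC pvNewC e = false := by
                unfold tSub at ht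
                by_cases h : ((PySem.Str.isIn pvOldC sc || sc == pvOldC) && sc != pvNewC) = true
                · rw [if_pos h] at ht; cases ht
                · simp only [mSub, hn, hs, beq_self_eq_true, Bool.true_and]
                  simpa using h
              rw [hstep, ih]
              simp [hm1, hm2, hm3]
            | some v =>
              have hstep : altStep (edits, true, ph, pj) e = (edits + 1, false, ph, pj) := by
                simp [altStep, hn, hs, ht]
              have hm1 : mSub "Classes" pvOldC pvNewC e = true := by
                unfold tSub at ht
                by_cases h : ((PySem.Str.isIn pvOldC sc || sc == pvOldC) && sc != pvNewC) = true
                · simp only [mSub, hn, hs, beq_self_eq_true, Bool.true_and]; exact h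
                · rw [if_neg h] at ht; cases ht
              rw [hstep, ih]
              simp [hm1, hm2, hm3]
              try omega
      · by_cases hh : n = "Headings"
        · subst hh
          have hm1 : mSub "Classes" pvOldC pvNewC e = false := by simp [mSub, hn]
          have hm3 : mJson e = false := by simp [mJson, hn]
          cases ph with
          | false =>
            have hstep : altStep (edits, pc, false, pj) e = (edits, pc, false, pj) := by
              simp [altStep, hn]
            rw [hstep, ih]
            simp [hm1, hm3]
          | true =>
            cases hs : pvGet e "scope" with
            | none =>
              have hstep : altStep (edits, pc, true, pj) e = (edits, pc, true, pj) := by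
                simp [altStep, hn, hs]
              have hm2 : mSub "Headings" pvOldH pvNewH e = false := by simp [mSub, hn, hs]
              rw [hstep, ih]
              simp [hm1, hm2, hm3]
            | some sc =>
              cases ht : tSub pvOldH pvNewH sc with
              | none =>
                have hstep : altStep (edits, pc, true, pj) e = (edits, pc, true, pj) := by
                  simp [altStep, hn, hs, ht]
                have hm2 : mSub "Headings" pvOldH pvNewH e = false := by
                  unfold tSub at ht
                  by_cases h : ((PySem.Str.isIn pvOldH sc || sc == pvOldH) && sc != pvNewH) = true
                  · rw [if_pos h] at ht; cases ht
                  · simp only [mSub, hn, hs, beq_self_eq_true, Bool.true_and]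
                    simpa using h
                rw [hstep, ih]
                simp [hm1, hm2, hm3]
              | some v =>
                have hstep : altStep (edits, pc, true, pj) e = (edits + 1, pc, false, pj) := by
                  simp [altStep, hn, hs, ht]
                have hm2 : mSub "Headings" pvOldH pvNewH e = true := by
                  unfold tSub at ht
                  by_cases h : ((PySem.Str.isIn pvOldH sc || sc == pvOldH) && sc != pvNewH) = true
                  · simp only [mSub, hn, hs, beq_self_eq_true, Bool.true_and]; exact h
                  · rw [if_neg h] at ht; cases ht
                rw [hstep, ih]
                simp [hm1, hm2, hm3]
                try omega
        · by_cases hj : n = "Json key"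
          · subst hj
            have hm1 : mSub "Classes" pvOldC pvNewC e = false := by simp [mSub, hn]
            have hm2 : mSub "Headings" pvOldH pvNewH e = false := by simp [mSub, hn]
            cases pj with
            | false =>
              have hstep : altStep (edits, pc, ph, false) e = (edits, pc, ph, false) := by
                simp [altStep, hn]
              rw [hstep, ih]
              simp [hm1, hm2]
            | true =>
              cases hs : pvGet e "scope" with
              | none =>
                have hstep : altStep (edits, pc, ph, true) e = (edits, pc, ph, true) := by
                  simp [altStep, hn, hs]
                have hm3 : mJson e = false := by simp [mJson, hn, hs]
                rw [hstep, ih]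
                simp [hm1, hm2, hm3]
              | some sc =>
                cases ht : tJson sc with
                | none =>
                  have hstep : altStep (edits, pc, ph, true) e = (edits, pc, ph, true) := by
                    simp [altStep, hn, hs, ht]
                  have hm3 : mJson e = false := by
                    unfold tJson at ht
                    by_cases h : (PySem.Str.isIn pvJOld sc && (PySem.Str.replace sc pvJOld pvJNew != sc)) = true
                    · rw [if_pos h] at ht; cases ht
                    · simp only [mJson, hn, hs, beq_self_eq_true, Bool.true_and]
                      simpa using h
                  rw [hstep, ih]
                  simp [hm1, hm2, hm3]
                | some v =>
                  have hstep : altStep (edits, pc, ph, true) e = (edits + 1, pc, ph, false) := by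
                    simp [altStep, hn, hs, ht]
                  have hm3 : mJson e = true := by
                    unfold tJson at ht
                    by_cases h : (PySem.Str.isIn pvJOld sc && (PySem.Str.replace sc pvJOld pvJNew != sc)) = true
                    · simp only [mJson, hn, hs, beq_self_eq_true, Bool.true_and]; exact h
                    · rw [if_neg h] at ht; cases ht
                  rw [hstep, ih]
                  simp [hm1, hm2, hm3]
                  try omega
          · have hstep : altStep (edits, pc, ph, pj) e = (edits, pc, ph, pj) := by
              simp [altStep, hn, hc, hh, hj]
            have hm1 : mSub "Classes" pvOldC pvNewC e = false := by simp [mSub, hn, hc]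
            have hm2 : mSub "Headings" pvOldH pvNewH e = false := by simp [mSub, hn, hh]
            have hm3 : mJson e = false := by simp [mJson, hn, hj]
            rw [hstep, ih]
            simp [hm1, hm2, hm3]

-- ===== VERDICT (by name: the statement is the Claim_ definition above) =====
theorem apply_patch_semantics_spec : Claim_equal_apply_patch_semantics := by
  intro theme _ _
  unfold Spec_apply_patch_semantics apply_patch_semantics apply_patch_semantics_alt
  cases hset : (PySem.Dict.mk theme).get? "settings" with
  | none => rfl
  | some s =>
    simp only
    rw [alt_fold, passSub_snd, passSub_snd, passJson_snd]
    rw [passSub_any _ "Classes" pvOldC pvNewC (mSub "Headings" pvOldH pvNewH)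
        (by intro e he; simp [mSub, he])]
    rw [passSub_any _ "Headings" pvOldH pvNewH mJson
        (by intro e he; simp [mJson, he])]
    rw [passSub_any _ "Classes" pvOldC pvNewC mJson
        (by intro e he; simp [mJson, he])]
    simp only [Bool.true_and]
    omega
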